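-- pv_equiv track=rewrite | github.com/Run-Surge/Parallelization_Module | testcases/mean_above_threshold.py | filter_above_threshold
-- ===== SOURCE A (Python) =====
-- def filter_above_threshold(data):
--     threshold = 50
--     numeric_data = []
--     for row in data[1:]:  # Skip header
--         numeric_row = []
--         for x in row:
--             numeric_row.append(x)
--         numeric_data.append(numeric_row)
--
--     num_columns = len(numeric_data[0])
--     num_rows = len(numeric_data)
--     filtered = []
--     for col_idx in range(num_columns):
--         col_filtered = []
--         for row_idx in range(num_rows):
--             value = numeric_data[row_idx][col_idx]
--             if value > threshold:
--                 col_filtered.append(value)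
--         filtered.append(col_filtered)
--     aggregation = "c:filtered"
--     return filtered
-- ===== SOURCE B (Python) =====
-- def filter_above_threshold(data):
--     num_cols = len(data[1])
--     columns = [[] for _ in range(num_cols)]
--     for row in data[1:]:
--         for col, value in zip(columns, row):
--             if value > 50:
--                 col.append(value)
--     return columns
-- ===== Notes on version B (the rewrite author's own statement) =====
-- stated objective: faster
-- what changed: Replaced A's upfront element-by-element copy plus column-major double scan (two index lookups numeric_data[row_idx][col_idx] per cell) by a single row-major pass that zips each row with the column buckets and appends matching values to all buckets at once, removing the copy and all index arithmetic.
-- outside the precondition, e.g. on filter_above_threshold([]): A raises IndexError, B raises IndexError; on filter_above_threshold([[1], [2, 60], [70]]): A raises IndexError, B returns [[70], [60]]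
import Mathlib
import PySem

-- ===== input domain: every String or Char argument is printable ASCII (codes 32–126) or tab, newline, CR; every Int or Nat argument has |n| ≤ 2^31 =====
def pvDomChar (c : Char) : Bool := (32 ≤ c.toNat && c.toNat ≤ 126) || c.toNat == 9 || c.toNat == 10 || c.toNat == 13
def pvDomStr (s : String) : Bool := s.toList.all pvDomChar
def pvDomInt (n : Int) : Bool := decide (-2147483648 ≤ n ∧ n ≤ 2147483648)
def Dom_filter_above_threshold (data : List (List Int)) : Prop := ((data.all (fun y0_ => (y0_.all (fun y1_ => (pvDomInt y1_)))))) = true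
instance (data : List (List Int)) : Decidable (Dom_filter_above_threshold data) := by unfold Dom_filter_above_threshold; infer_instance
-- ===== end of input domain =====

-- B replaces A's copy-then-column-major double scan by one row-major pass that zips each
-- row with the column buckets (alternative decomposition, same asymptotic cost).
-- B's Python appends to the bucket lists in place; the return value is what is compared.


-- ===== PORT A =====
def filter_above_threshold (data : List (List Int)) : List (List Int) :=
  let threshold : Int := 50
  let numeric_data : List (List Int) :=
    (PySem.List.slice data (some 1) none).foldl
      (fun nd row => nd ++ [row.foldl (fun nr x => nr ++ [x]) []]) []
  let num_columns : Int := (PySem.List.pyGetD numeric_data 0 []).length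
  let num_rows : Int := numeric_data.length
  (PySem.List.pyRange 0 num_columns 1).foldl
    (fun filtered col_idx =>
      filtered ++
        [(PySem.List.pyRange 0 num_rows 1).foldl
          (fun col_filtered row_idx =>
            let value := PySem.List.pyGetD (PySem.List.pyGetD numeric_data row_idx []) col_idx 0
            if value > threshold then col_filtered ++ [value] else col_filtered) []]) []

-- ===== PORT B =====
def filter_above_threshold_alt (data : List (List Int)) : List (List Int) :=
  let num_cols : Int := (PySem.List.pyGetD data 1 []).length
  let columns : List (List Int) := (PySem.List.pyRange 0 num_cols 1).map (fun _ => [])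
  -- the in-place 'col.append' over zip(columns, row) updates the zipped prefix and leaves
  -- the remaining columns unchanged; exact for zip's truncation on either side
  (PySem.List.slice data (some 1) none).foldl
    (fun cols row =>
      List.zipWith (fun col value => if value > 50 then col ++ [value] else col) cols row
        ++ cols.drop row.length)
    columns

-- ===== PRECONDITION & SPEC =====
-- Pre_ excludes exactly the inputs on which A raises IndexError: fewer than two rows
-- (numeric_data[0]), or some data row shorter than the first data row (row[col_idx]).
def Pre_filter_above_threshold (data : List (List Int)) : Prop :=
  2 ≤ data.length ∧ ∀ r ∈ data.drop 1, (data.getD 1 []).length ≤ r.length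
instance (data : List (List Int)) : Decidable (Pre_filter_above_threshold data) := by
  unfold Pre_filter_above_threshold; infer_instance
def pvWitness_filter_above_threshold : List (List Int) := [[1], [60, 10], [70, 80]]
def Spec_filter_above_threshold (data : List (List Int)) (out : List (List Int)) : Prop := out = filter_above_threshold_alt data
instance (data : List (List Int)) (out : List (List Int)) : Decidable (Spec_filter_above_threshold data out) := by unfold Spec_filter_above_threshold; infer_instance

-- ===== CLAIM (what is proved, stated in full; the proofs are below) =====
def Claim_equal_filter_above_threshold : Prop := ∀ (data : List (List Int)), Dom_filter_above_threshold data → Pre_filter_above_threshold data → Spec_filter_above_threshold data (filter_above_threshold data)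

-- ===== LEMMAS AND PROOFS =====

-- the per-column filter both programs compute over the data rows
def colA (rows : List (List Int)) (c : Int) : List Int :=
  rows.foldl (fun acc r =>
    if PySem.List.pyGetD r c 0 > 50 then acc ++ [PySem.List.pyGetD r c 0] else acc) []

theorem map_getD_range (cols : List (List Int)) :
    (List.range cols.length).map (fun k => cols.getD k []) = cols := by
  apply List.ext_getElem
  · simp
  · intro i h1 h2
    simp [List.getD_eq_getElem?_getD, List.getElem?_eq_getElem h2]

theorem foldl_if_append {α : Type} (f : α → Int) (P : α → Prop) [DecidablePred P] :
    ∀ (l : List α) (a : List Int),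
      l.foldl (fun acc r => if P r then acc ++ [f r] else acc) a
        = a ++ l.foldl (fun acc r => if P r then acc ++ [f r] else acc) [] := by
  intro l
  induction l with
  | nil => simp
  | cons x l ih =>
      intro a
      rw [List.foldl_cons, List.foldl_cons, ih, ih (if P x then [] ++ [f x] else [])]
      split <;> simp

theorem colA_cons_eq (row : List Int) (rows : List (List Int)) (c : Int) :
    colA (row :: rows) c =
      (if PySem.List.pyGetD row c 0 > 50 then [PySem.List.pyGetD row c 0] else []) ++ colA rows c := by
  simp only [colA, List.foldl_cons]
  rw [foldl_if_append (fun r => PySem.List.pyGetD r c 0) (fun r => PySem.List.pyGetD r c 0 > 50)]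
  split <;> simp

theorem Bfold (rows : List (List Int)) (cols : List (List Int))
    (h : ∀ r ∈ rows, cols.length ≤ r.length) :
    rows.foldl (fun cs row =>
        List.zipWith (fun col value => if value > 50 then col ++ [value] else col) cs row
          ++ cs.drop row.length) cols
      = (List.range cols.length).map (fun k => cols.getD k [] ++ colA rows (k : Int)) := by
  induction rows generalizing cols with
  | nil =>
      simp only [List.foldl_nil, colA, List.foldl_nil]
      conv_lhs => rw [← map_getD_range cols]
      simp
  | cons row rows ih =>
      have hdrop : cols.drop row.length = [] := List.drop_eq_nil_of_le (h row (by simp))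
      have hlen : (List.zipWith (fun col value => if value > 50 then col ++ [value] else col) cols row).length = cols.length := by
        have := h row (by simp)
        simp [List.length_zipWith]; omega
      simp only [List.foldl_cons, hdrop, List.append_nil]
      rw [ih _ (by intro r hr; rw [hlen]; exact h r (by simp [hr]))]
      rw [hlen]
      apply List.map_congr_left
      intro k hk
      have hk' : k < cols.length := List.mem_range.mp hk
      have hkr : k < row.length := lt_of_lt_of_le hk' (h row (by simp))
      rw [colA_cons_eq]
      have hget : (List.zipWith (fun col value => if value > 50 then col ++ [value] else col) cols row).getD k []
          = (fun col value => if value > 50 then col ++ [value] else col) cols[k] row[k] := by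
        rw [List.getD_eq_getElem _ _ (by omega)]
        simp [List.getElem_zipWith]
      rw [hget]
      have hrow : PySem.List.pyGetD row (k : Int) 0 = row[k] := by
        rw [PySem.List.pyGetD_natCast, List.getD_eq_getElem _ _ hkr]
      rw [List.getD_eq_getElem _ _ hk', hrow]
      split <;> simp_all

theorem copy_eq (rows : List (List Int)) :
    rows.foldl (fun nd row => nd ++ [row.foldl (fun nr x => nr ++ [x]) []]) [] = rows := by
  have h1 : ∀ (row : List Int), row.foldl (fun nr x => nr ++ [x]) [] = row := by
    intro row; rw [PySem.List.foldl_append_singleton]; simp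
  rw [PySem.List.foldl_append_singleton_eq_map,
    show (List.foldl (fun nr x => nr ++ [x]) ([] : List Int)) = id from funext h1]
  simp

-- ===== VERDICT (by name: the statement is the Claim_ definition above) =====
theorem filter_above_threshold_spec : Claim_equal_filter_above_threshold := by
  intro data _ hpre
  unfold Spec_filter_above_threshold
  obtain ⟨hlen, hrows⟩ := hpre
  obtain ⟨d0, r0, rest, rfl⟩ : ∃ d0 r0 rest, data = d0 :: r0 :: rest := by
    match data, hlen with
    | d0 :: r0 :: rest, _ => exact ⟨d0, r0, rest, rfl⟩
  simp only [List.drop_succ_cons, List.drop_zero, List.getD_cons_succ, List.getD_cons_zero] at hrows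
  -- A side
  show filter_above_threshold (d0 :: r0 :: rest) = _
  unfold filter_above_threshold filter_above_threshold_alt
  simp only [PySem.List.slice_from_one, List.tail_cons, copy_eq]
  have hnd0 : PySem.List.pyGetD (r0 :: rest) 0 ([] : List Int) = r0 := by
    simp [PySem.List.pyGetD_zero]
  have hd1 : PySem.List.pyGetD (d0 :: r0 :: rest) 1 ([] : List Int) = r0 := by
    rw [show (1 : Int) = ((1 : Nat) : Int) by norm_num, PySem.List.pyGetD_natCast]
    rfl
  rw [hnd0, hd1]
  -- inner loops of A: fold over row indices with pyGetD = fold over the rows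
  have hinner : ∀ (c : Int),
      (PySem.List.pyRange 0 ((r0 :: rest).length : Int) 1).foldl
        (fun col_filtered row_idx =>
          let value := PySem.List.pyGetD (PySem.List.pyGetD (r0 :: rest) row_idx []) c 0
          if value > 50 then col_filtered ++ [value] else col_filtered) []
      = colA (r0 :: rest) c := by
    intro c
    exact PySem.List.foldl_pyRange_zero_pyGetD' (r0 :: rest) []
      (fun acc r => if PySem.List.pyGetD r c 0 > 50 then acc ++ [PySem.List.pyGetD r c 0] else acc) []
  -- outer loop of A: fold-append = map over the column range
  rw [PySem.List.foldl_append_singleton_eq_map]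
  simp only [hinner]
  -- B side
  rw [Bfold (r0 :: rest) _ (by
    intro r hr
    have := hrows r hr
    simp only [List.length_map, PySem.List.length_pyRange_one]
    omega)]
  simp only [List.length_map, PySem.List.length_pyRange_one]
  rw [PySem.List.pyRange_one]
  simp only [List.map_map, Int.sub_zero, Int.toNat_natCast]
  apply List.map_congr_left
  intro k hk
  have hk' : k < r0.length := List.mem_range.mp hk
  rw [List.getD_eq_getElem _ _ (by simpa using hk')]
  simp
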